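-- pv_equiv track=rewrite | github.com/DataMonarch/telegram-scheduler-ai-agent | src/services/scheduler.py | subtract_busy
-- ===== SOURCE A (Python) =====
-- def subtract_busy(working_interval, busy_intervals):
--     free_intervals = []
--     working_start, working_end = working_interval
--     busy_sorted = sorted(busy_intervals, key=lambda x: x[0])
--
--     current = working_start
--     for b_start, b_end in busy_sorted:
--         if b_start > current:
--             free_intervals.append((current, b_start))
--         if b_end > current:
--             current = max(current, b_end)
--     if current < working_end:
--         free_intervals.append((current, working_end))
--     return free_intervals
-- ===== SOURCE B (Python) =====
-- def subtract_busy(working_interval, busy_intervals):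
--     working_start, working_end = working_interval
--     bys = sorted(busy_intervals, key=lambda iv: iv[0])
--     # covered[i] = furthest busy end seen before interval i (at least working_start)
--     covered = [working_start]
--     for _, b_end in bys:
--         covered.append(max(covered[-1], b_end))
--     free = [(c, bs) for (bs, _), c in zip(bys, covered) if bs > c]
--     if covered[-1] < working_end:
--         free.append((covered[-1], working_end))
--     return free
-- ===== Notes on version B (the rewrite author's own statement) =====
-- stated objective: alternative
-- what changed: A interleaves state and output in one sweep (running cursor, conditional appends); B separates the computation into a materialized running-max 'covered' table plus a zip/filter comprehension that reads gaps off the table, with the tail gap taken from the table's last entry.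
import Mathlib
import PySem

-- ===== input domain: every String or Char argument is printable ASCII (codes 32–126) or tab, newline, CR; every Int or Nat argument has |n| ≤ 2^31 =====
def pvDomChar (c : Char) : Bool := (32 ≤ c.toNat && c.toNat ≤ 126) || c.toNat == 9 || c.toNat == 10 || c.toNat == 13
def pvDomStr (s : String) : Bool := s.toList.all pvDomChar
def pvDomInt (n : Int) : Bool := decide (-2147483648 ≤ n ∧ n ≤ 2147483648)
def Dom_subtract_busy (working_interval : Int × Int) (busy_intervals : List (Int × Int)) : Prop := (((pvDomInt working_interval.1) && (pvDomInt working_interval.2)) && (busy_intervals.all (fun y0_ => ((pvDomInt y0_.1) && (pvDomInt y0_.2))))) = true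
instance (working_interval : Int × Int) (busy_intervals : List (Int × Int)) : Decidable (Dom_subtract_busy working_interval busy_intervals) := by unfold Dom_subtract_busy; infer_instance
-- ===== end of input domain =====

-- B replaces A's single stateful sweep by a two-pass form (materialized running-max table
-- + a zip/filter comprehension over it); same complexity, alternative structure.


-- ===== PORT A =====
-- literal transliteration of A: sort by start, one fold carrying (free_intervals, current),
-- then the final tail gap.
def subtract_busy (working_interval : Int × Int) (busy_intervals : List (Int × Int)) : List (Int × Int) :=
  let working_start := working_interval.1
  let working_end := working_interval.2
  let busy_sorted := PySem.List.sorted busy_intervals (fun x => x.1) false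
  let st := busy_sorted.foldl (fun (st : List (Int × Int) × Int) b =>
      let st := if b.1 > st.2 then (st.1 ++ [(st.2, b.1)], st.2) else st
      if b.2 > st.2 then (st.1, max st.2 b.2) else st) ([], working_start)
  if st.2 < working_end then st.1 ++ [(st.2, working_end)] else st.1

-- ===== PORT B =====
-- Source B's `covered` table (the append loop), as structural recursion: [ws, max(ws,be1), …]
def pvCoveredTable (m : Int) (l : List (Int × Int)) : List Int :=
  match l with
  | [] => [m]
  | b :: t => m :: pvCoveredTable (max m b.2) t

-- transliteration of Source B: covered table, zip/filter comprehension, tail gap from covered[-1]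
-- (pvCoveredTable is never empty, so getLastD is exactly Python's covered[-1]).
def subtract_busy_alt (working_interval : Int × Int) (busy_intervals : List (Int × Int)) : List (Int × Int) :=
  let working_start := working_interval.1
  let working_end := working_interval.2
  let bys := PySem.List.sorted busy_intervals (fun iv => iv.1) false
  let covered := pvCoveredTable working_start bys
  let free := ((bys.zip covered).filter (fun p => p.1.1 > p.2)).map (fun p => (p.2, p.1.1))
  let last := covered.getLastD working_start
  if last < working_end then free ++ [(last, working_end)] else free

-- ===== PRECONDITION & SPEC =====
def Spec_subtract_busy (working_interval : Int × Int) (busy_intervals : List (Int × Int)) (out : List (Int × Int)) : Prop := out = subtract_busy_alt working_interval busy_intervals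
instance (working_interval : Int × Int) (busy_intervals : List (Int × Int)) (out : List (Int × Int)) : Decidable (Spec_subtract_busy working_interval busy_intervals out) := by unfold Spec_subtract_busy; infer_instance

-- ===== CLAIM (what is proved, stated in full; the proofs are below) =====
def Claim_equal_subtract_busy : Prop := ∀ (working_interval : Int × Int) (busy_intervals : List (Int × Int)), Dom_subtract_busy working_interval busy_intervals → Spec_subtract_busy working_interval busy_intervals (subtract_busy working_interval busy_intervals)

-- ===== LEMMAS AND PROOFS =====

lemma pvCoveredTable_ne_nil (m : Int) (l : List (Int × Int)) : pvCoveredTable m l ≠ [] := by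
  cases l <;> simp [pvCoveredTable]

lemma getLastD_eq_of_ne_nil {α : Type} (l : List α) (h : l ≠ []) (d d' : α) :
    l.getLastD d = l.getLastD d' := by
  cases l with
  | nil => exact absurd rfl h
  | cons a t => rfl

-- one step of A's fold, in closed form
lemma step_eq (st : List (Int × Int) × Int) (b : Int × Int) :
    (let st' := if b.1 > st.2 then (st.1 ++ [(st.2, b.1)], st.2) else st
     if b.2 > st'.2 then (st'.1, max st'.2 b.2) else st')
    = (st.1 ++ (if b.1 > st.2 then [(st.2, b.1)] else []), max st.2 b.2) := by
  obtain ⟨acc, cur⟩ := st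
  by_cases h1 : b.1 > cur <;> by_cases h2 : b.2 > cur <;>
    simp [h1, h2, max_def] <;> omega

-- the sweep with any starting accumulator and cursor equals B's table-and-comprehension form
lemma sweep_eq (we : Int) :
    ∀ (l : List (Int × Int)) (cur : Int) (acc : List (Int × Int)),
    (let st := l.foldl (fun (st : List (Int × Int) × Int) b =>
        let st := if b.1 > st.2 then (st.1 ++ [(st.2, b.1)], st.2) else st
        if b.2 > st.2 then (st.1, max st.2 b.2) else st) (acc, cur)
     if st.2 < we then st.1 ++ [(st.2, we)] else st.1)
    = acc ++ ((l.zip (pvCoveredTable cur l)).filter (fun p => p.1.1 > p.2)).map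
          (fun p => (p.2, p.1.1))
        ++ (if (pvCoveredTable cur l).getLastD cur < we
            then [((pvCoveredTable cur l).getLastD cur, we)] else []) := by
  intro l
  induction l with
  | nil =>
      intro cur acc
      simp [pvCoveredTable, List.getLastD]
      by_cases h : cur < we <;> simp [h]
  | cons b t ih =>
      intro cur acc
      have hstep := step_eq (acc, cur) b
      simp only [List.foldl_cons]
      rw [hstep]
      rw [ih (max cur b.2) (acc ++ (if b.1 > cur then [(cur, b.1)] else []))]
      have hlast : (pvCoveredTable cur (b :: t)).getLastD cur
          = (pvCoveredTable (max cur b.2) t).getLastD (max cur b.2) := by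
        simp only [pvCoveredTable, List.getLastD_cons]
        exact getLastD_eq_of_ne_nil _ (pvCoveredTable_ne_nil _ _) _ _
      rw [hlast]
      by_cases h : b.1 > cur <;>
        simp [pvCoveredTable, h, List.append_assoc]

lemma append_ite_singleton {α : Type} (c : Prop) [Decidable c] (l : List α) (x : α) :
    (l ++ if c then [x] else []) = if c then l ++ [x] else l := by
  split_ifs <;> simp

-- ===== VERDICT (by name: the statement is the Claim_ definition above) =====
theorem subtract_busy_spec : Claim_equal_subtract_busy := by
  intro wi busy _
  unfold Spec_subtract_busy subtract_busy subtract_busy_alt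
  simpa [append_ite_singleton] using
    sweep_eq wi.2 (PySem.List.sorted busy (fun x => x.1) false) wi.1 []
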